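-- pv_equiv track=rewrite | github.com/HugoKlepsch/AOC2021 | 3/src/part2.py | get_bitstrings
-- ===== SOURCE A (Python) =====
-- from collections import defaultdict
--
-- def get_bitstrings(lines):
--   report_column_counts = defaultdict(lambda: defaultdict(int))
--   gamma_bitstring = ''
--   epsilon_bitstring = ''
--   for line in lines:
--     line_i = 0
--     for c in line:
--       report_column_counts[line_i][int(c)] += 1
--       line_i += 1
--     gamma_bitstring = ''
--     epsilon_bitstring = ''
--     for col in report_column_counts.keys():
--       if report_column_counts[col][0] > report_column_counts[col][1]:
--         gamma_bitstring += '0'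
--         epsilon_bitstring += '1'
--       else:
--         gamma_bitstring += '1'
--         epsilon_bitstring += '0'
--   return gamma_bitstring, epsilon_bitstring
-- ===== SOURCE B (Python) =====
-- def get_bitstrings(lines):
--   width = max((len(line) for line in lines), default=0)
--   gamma = []
--   epsilon = []
--   for j in range(width):
--     zeros = 0
--     ones = 0
--     for line in lines:
--       if j < len(line):
--         bit = int(line[j])
--         if bit == 0:
--           zeros += 1
--         elif bit == 1:
--           ones += 1
--     if zeros > ones:
--       gamma.append('0')
--       epsilon.append('1')
--     else:
--       gamma.append('1')
--       epsilon.append('0')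
--   return ''.join(gamma), ''.join(epsilon)
-- ===== Notes on version B (the rewrite author's own statement) =====
-- stated objective: alternative
-- what changed: B transposes the iteration: it computes the maximum line width once and then, column by column, scans the lines counting zero/one bits and emits one gamma/epsilon character per column - no dict and no per-line rebuild of the result strings, unlike A's nested count-dicts refreshed after every line.
import Mathlib
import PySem

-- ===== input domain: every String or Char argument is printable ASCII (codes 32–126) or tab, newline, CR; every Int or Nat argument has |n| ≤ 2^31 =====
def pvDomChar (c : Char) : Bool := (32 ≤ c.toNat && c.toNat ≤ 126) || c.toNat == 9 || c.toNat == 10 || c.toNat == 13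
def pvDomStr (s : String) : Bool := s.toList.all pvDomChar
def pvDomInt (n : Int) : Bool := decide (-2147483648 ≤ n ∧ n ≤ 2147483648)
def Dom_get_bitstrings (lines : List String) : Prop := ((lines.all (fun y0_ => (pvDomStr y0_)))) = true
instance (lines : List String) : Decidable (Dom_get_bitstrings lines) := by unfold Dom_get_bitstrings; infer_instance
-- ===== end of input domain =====

-- B transposes the iteration: width computed once, then a column-major scan counting the
-- zero/one bits per column (no dict, no per-line rebuild of the result strings).


-- ===== PORT A =====
-- int(c) for a single char; Pre_ restricts to digit chars, where ofChars? is some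
-- (on any other char Python's int(c) raises ValueError)
def pvIntChar (c : Char) : Int := (PySem.Int.ofChars? [c]).getD 0

-- the gamma/epsilon rebuild loop over the keys of the count dict (A runs it after every line)
def pvRender (rcc : PySem.Dict Int (PySem.Dict Int Int)) : List Char × List Char :=
  rcc.keys.foldl
    (fun (ge : List Char × List Char) col =>
      let inner := rcc.getD col PySem.Dict.empty
      if inner.getD 0 0 > inner.getD 1 0 then (ge.1 ++ ['0'], ge.2 ++ ['1'])
      else (ge.1 ++ ['1'], ge.2 ++ ['0']))
    ([], [])

-- one char of the inner loop: report_column_counts[line_i][int(c)] += 1; line_i += 1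
-- (defaultdict reads ported as getD: this is value-faithful — the 0-valued keys a bare
-- read would insert into an inner dict are never iterated, only looked up with default 0,
-- and the outer key is written immediately at the same position)
def pvCharStep (q : PySem.Dict Int (PySem.Dict Int Int) × Int) (c : Char) :
    PySem.Dict Int (PySem.Dict Int Int) × Int :=
  let inner := q.1.getD q.2 PySem.Dict.empty
  (q.1.insert q.2 (inner.insert (pvIntChar c) (inner.getD (pvIntChar c) 0 + 1)), q.2 + 1)

-- one line of A's loop: count the chars, then rebuild both bitstrings from scratch
def pvLineStep (st : PySem.Dict Int (PySem.Dict Int Int) × List Char × List Char)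
    (line : String) : PySem.Dict Int (PySem.Dict Int Int) × List Char × List Char :=
  let rcc := (line.toList.foldl pvCharStep (st.1, 0)).1
  (rcc, pvRender rcc)

def get_bitstrings (lines : List String) : String × String :=
  let st := lines.foldl pvLineStep (PySem.Dict.empty, [], [])
  (String.mk st.2.1, String.mk st.2.2)

-- ===== PORT B =====
-- width = max(len(line) for line in lines, default=0); then for each column j,
-- an inner loop over the lines parses bit = int(line[j]) (pvIntChar, as in port A)
-- and counts zeros/ones, emitting one gamma/epsilon char per column.
def get_bitstrings_alt (lines : List String) : String × String :=
  let width := lines.foldl (fun m l => max m l.toList.length) 0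
  let ge := (List.range width).foldl
    (fun (ge : List Char × List Char) j =>
      let zo := lines.foldl
        (fun (zo : Nat × Nat) l =>
          if j < l.toList.length then
            let bit := pvIntChar (l.toList.getD j ' ')
            if bit = 0 then (zo.1 + 1, zo.2) else if bit = 1 then (zo.1, zo.2 + 1) else zo
          else zo) (0, 0)
      if zo.1 > zo.2 then (ge.1 ++ ['0'], ge.2 ++ ['1']) else (ge.1 ++ ['1'], ge.2 ++ ['0']))
    ([], [])
  (String.mk ge.1, String.mk ge.2)

-- ===== PRECONDITION & SPEC =====
-- Pre_ admits exactly the inputs A returns on: int(c) raises ValueError on any non-digit char.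
def Pre_get_bitstrings (lines : List String) : Prop :=
  (lines.all (fun s => s.toList.all Char.isDigit)) = true
instance (lines : List String) : Decidable (Pre_get_bitstrings lines) := by
  unfold Pre_get_bitstrings; infer_instance
def pvWitness_get_bitstrings : List String := ["010", "110", "1"]

def Spec_get_bitstrings (lines : List String) (out : String × String) : Prop := out = get_bitstrings_alt lines
instance (lines : List String) (out : String × String) : Decidable (Spec_get_bitstrings lines out) := by unfold Spec_get_bitstrings; infer_instance

-- ===== CLAIM (what is proved, stated in full; the proofs are below) =====
def Claim_equal_get_bitstrings : Prop := ∀ (lines : List String), Dom_get_bitstrings lines → Pre_get_bitstrings lines → Spec_get_bitstrings lines (get_bitstrings lines)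

-- ===== LEMMAS AND PROOFS =====

-- proof-side abstraction: a flat per-column dict of (zeros, ones) pairs
def pvColStep (d : PySem.Dict Int (Int × Int)) (p : Int × Char) : PySem.Dict Int (Int × Int) :=
  let bit := pvIntChar p.2
  let zo := d.getD p.1 (0, 0)
  d.insert p.1 (zo.1 + (if bit = 0 then 1 else 0), zo.2 + (if bit = 1 then 1 else 0))

-- value view of an inner count dict: (count of '0's, count of '1's)
def pvF (inner : PySem.Dict Int Int) : Int × Int := (inner.getD 0 0, inner.getD 1 0)

-- A's nested dict seen through pvF, entrywise (same keys, same order)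
def pvMap (d : PySem.Dict Int (PySem.Dict Int Int)) : PySem.Dict Int (Int × Int) :=
  PySem.Dict.mk (d.items.map (fun p => (p.1, pvF p.2)))

theorem pvMap_contains (d : PySem.Dict Int (PySem.Dict Int Int)) (k : Int) :
    (pvMap d).contains k = d.contains k := by
  simp only [pvMap, PySem.Dict.contains, List.any_map]
  rfl

theorem pvMap_get? (d : PySem.Dict Int (PySem.Dict Int Int)) (k : Int) :
    (pvMap d).get? k = (d.get? k).map pvF := by
  obtain ⟨l⟩ := d
  induction l with
  | nil => rfl
  | cons p rest ih =>
      obtain ⟨pk, pv⟩ := p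
      by_cases h : (pk == k)
      · simp [pvMap, PySem.Dict.get?_mk_cons, h]
      · simp only [pvMap, List.map_cons, PySem.Dict.get?_mk_cons, h, if_false,
          Bool.false_eq_true]
        exact ih

theorem pvMap_getD (d : PySem.Dict Int (PySem.Dict Int Int)) (k : Int) :
    (pvMap d).getD k (0, 0) = pvF (d.getD k PySem.Dict.empty) := by
  rw [PySem.Dict.getD_eq_get?_getD, PySem.Dict.getD_eq_get?_getD, pvMap_get?]
  cases d.get? k <;> rfl

theorem pvMap_insert (d : PySem.Dict Int (PySem.Dict Int Int)) (k : Int)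
    (v : PySem.Dict Int Int) : pvMap (d.insert k v) = (pvMap d).insert k (pvF v) := by
  apply PySem.Dict.ext
  show ((d.insert k v).items).map (fun p => (p.1, pvF p.2)) = _
  rw [PySem.Dict.items_insert, PySem.Dict.items_insert, pvMap_contains]
  by_cases h : d.contains k = true
  · simp only [h, if_true, pvMap, List.map_map]
    apply List.map_congr_left
    intro p _
    by_cases hp : p.1 = k <;> simp [hp]
  · simp [h, pvMap]

theorem pv_digit_cases (c : Char) (h : c.isDigit = true) :
    c = '0' ∨ c = '1' ∨ c = '2' ∨ c = '3' ∨ c = '4' ∨ c = '5' ∨ c = '6' ∨ c = '7' ∨ c = '8' ∨ c = '9' := by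
  have h48 : 48 ≤ c.toNat ∧ c.toNat ≤ 57 := by
    simp [Char.isDigit] at h
    exact ⟨h.1, h.2⟩
  have hc : c = Char.ofNat c.toNat := (Char.ofNat_toNat c).symm
  obtain ⟨h1, h2⟩ := h48
  interval_cases h3 : c.toNat <;> rw [hc] <;> simp

theorem pvF_step (inner : PySem.Dict Int Int) (c : Char) (h : c.isDigit = true) :
    pvF (inner.insert (pvIntChar c) (inner.getD (pvIntChar c) 0 + 1))
      = ((pvF inner).1 + (if pvIntChar c = 0 then 1 else 0),
         (pvF inner).2 + (if pvIntChar c = 1 then 1 else 0)) := by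
  rcases pv_digit_cases c h with h|h|h|h|h|h|h|h|h|h <;> subst h <;>
    simp [pvF, PySem.Dict.getD_insert,
      show pvIntChar '0' = 0 from by decide, show pvIntChar '1' = 1 from by decide,
      show pvIntChar '2' = 2 from by decide, show pvIntChar '3' = 3 from by decide,
      show pvIntChar '4' = 4 from by decide, show pvIntChar '5' = 5 from by decide,
      show pvIntChar '6' = 6 from by decide, show pvIntChar '7' = 7 from by decide,
      show pvIntChar '8' = 8 from by decide, show pvIntChar '9' = 9 from by decide]

theorem pvInner_rel (cs : List Char) (d : PySem.Dict Int (PySem.Dict Int Int)) (i : Int)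
    (h : cs.all Char.isDigit = true) :
    pvMap ((cs.foldl pvCharStep (d, i)).1)
      = (PySem.List.enumerate cs i).foldl pvColStep (pvMap d) := by
  induction cs generalizing d i with
  | nil => rfl
  | cons c cs ih =>
      simp only [List.all_cons, Bool.and_eq_true] at h
      rw [PySem.List.enumerate_cons, List.foldl_cons, List.foldl_cons]
      rw [ih _ _ h.2]
      congr 1
      show pvMap ((pvCharStep (d, i) c).1) = pvColStep (pvMap d) (i, c)
      simp only [pvCharStep, pvColStep, pvMap_insert, pvF_step _ c h.1, pvMap_getD]

theorem pvOuter_rel (lines : List String)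
    (d : PySem.Dict Int (PySem.Dict Int Int)) (ge : List Char × List Char)
    (h : lines.all (fun s => s.toList.all Char.isDigit) = true) :
    pvMap ((lines.foldl pvLineStep (d, ge)).1)
      = lines.foldl (fun d line => (PySem.List.enumerate line.toList 0).foldl pvColStep d)
          (pvMap d) := by
  induction lines generalizing d ge with
  | nil => rfl
  | cons l ls ih =>
      simp only [List.all_cons, Bool.and_eq_true] at h
      rw [List.foldl_cons, List.foldl_cons]
      rw [show pvLineStep (d, ge) l = (((l.toList.foldl pvCharStep (d, 0)).1),
        pvRender ((l.toList.foldl pvCharStep (d, 0)).1)) from rfl]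
      rw [ih _ _ h.2, pvInner_rel _ _ _ h.1]

theorem pvInner_nodup (cs : List Char) : ∀ (q : PySem.Dict Int (PySem.Dict Int Int) × Int),
    q.1.keys.Nodup → (cs.foldl pvCharStep q).1.keys.Nodup := by
  induction cs with
  | nil => exact fun _ h => h
  | cons c cs ih => exact fun q h => ih _ (PySem.Dict.nodup_keys_insert _ _ _ h)

theorem pvOuter_nodup (lines : List String) :
    ∀ (st : PySem.Dict Int (PySem.Dict Int Int) × List Char × List Char),
    st.1.keys.Nodup → (lines.foldl pvLineStep st).1.keys.Nodup := by
  induction lines with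
  | nil => exact fun _ h => h
  | cons l ls ih => exact fun st h => ih _ (pvInner_nodup _ _ h)

theorem pvRender_rel (d : PySem.Dict Int (PySem.Dict Int Int)) (h : d.keys.Nodup) :
    pvRender d
      = (pvMap d).values.foldl
          (fun (ge : List Char × List Char) zo =>
            if zo.1 > zo.2 then (ge.1 ++ ['0'], ge.2 ++ ['1']) else (ge.1 ++ ['1'], ge.2 ++ ['0']))
          ([], []) := by
  have hv : (pvMap d).values = d.items.map (fun p => pvF p.2) := by
    simp [pvMap, PySem.Dict.values]
  rw [pvRender, hv, show d.keys = d.items.map (fun p => p.1) from rfl,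
    List.foldl_map, List.foldl_map]
  apply PySem.List.foldl_congr_mem
  intro acc p hp
  have hg : d.getD p.1 PySem.Dict.empty = p.2 :=
    PySem.Dict.getD_of_mem_items d (by simpa using hp) h _
  simp [hg, pvF]

theorem pvStrings_shape (lines : List String) :
    ∀ (st : PySem.Dict Int (PySem.Dict Int Int) × List Char × List Char),
    st.2 = pvRender st.1 →
    (lines.foldl pvLineStep st).2 = pvRender ((lines.foldl pvLineStep st).1) := by
  induction lines with
  | nil => exact fun _ h => h
  | cons l ls ih => exact fun st _ => ih _ rfl

-- ===== bridge from the flat column dict to B's column-major scan =====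

def pvBump (zo : Int × Int) (c : Char) : Int × Int :=
  (zo.1 + (if pvIntChar c = 0 then 1 else 0), zo.2 + (if pvIntChar c = 1 then 1 else 0))

-- the flat dict whose keys are the naturals below w, in order
def pvRng (w : Nat) (f : Nat → Int × Int) : PySem.Dict Int (Int × Int) :=
  PySem.Dict.mk ((List.range w).map (fun (j : Nat) => ((j : Int), f j)))

def pvExt (w : Nat) (f : Nat → Int × Int) (j : Nat) : Int × Int := if j < w then f j else (0, 0)

theorem pvRng_congr (w : Nat) (f g : Nat → Int × Int) (h : ∀ j, j < w → f j = g j) :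
    pvRng w f = pvRng w g := by
  apply PySem.Dict.ext
  show (List.range w).map (fun (j : Nat) => ((j : Int), f j)) = (List.range w).map (fun (j : Nat) => ((j : Int), g j))
  apply List.map_congr_left
  intro j hj
  rw [h j (List.mem_range.mp hj)]

theorem pv_get?_mk_map (l : List Nat) (f : Nat → Int × Int) (i : Nat) :
    (PySem.Dict.mk (l.map fun (j : Nat) => ((j : Int), f j))).get? (i : Int)
      = if i ∈ l then some (f i) else none := by
  induction l with
  | nil => rfl
  | cons k l ih =>
      rw [List.map_cons, PySem.Dict.get?_mk_cons]
      by_cases hk : k = i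
      · subst hk; simp
      · have : ((k : Int) == (i : Int)) = false := by
          simp [hk]
        rw [this]
        simp only [Bool.false_eq_true, if_false, ih, List.mem_cons]
        by_cases hi : i ∈ l <;> simp [hi, Ne.symm hk]

theorem pvRng_getD (w : Nat) (f : Nat → Int × Int) (i : Nat) :
    (pvRng w f).getD (i : Int) (0, 0) = pvExt w f i := by
  rw [pvRng, PySem.Dict.getD_eq_get?_getD, pv_get?_mk_map]
  by_cases h : i < w <;> simp [pvExt, h, List.mem_range]

theorem pvRng_contains (w : Nat) (f : Nat → Int × Int) (i : Nat) :
    (pvRng w f).contains (i : Int) = decide (i < w) := by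
  have hiff : ((pvRng w f).contains (i : Int) = true) ↔ (i < w) := by
    rw [PySem.Dict.contains_iff_mem_keys]
    show (i : Int) ∈ ((List.range w).map (fun (j : Nat) => ((j : Int), f j))).map Prod.fst ↔ _
    simp [List.mem_map, List.mem_range]
  cases hc : (pvRng w f).contains (i : Int)
  · rw [hc] at hiff
    simp at hiff
    simp [hiff]
  · rw [hc] at hiff
    simp at hiff
    simp [hiff]

theorem pvRng_insert (w i : Nat) (h : i ≤ w) (f : Nat → Int × Int) (v : Int × Int) :
    (pvRng w f).insert (i : Int) v
      = pvRng (max w (i + 1)) (fun j => if j = i then v else pvExt w f j) := by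
  have hitems : ∀ (g : Nat → Int × Int) (u : Nat),
      (pvRng u g).items = (List.range u).map (fun (j : Nat) => ((j : Int), g j)) := fun _ _ => rfl
  apply PySem.Dict.ext
  rw [PySem.Dict.items_insert, pvRng_contains, hitems, hitems]
  by_cases hi : i < w
  · rw [if_pos (by simpa using hi)]
    have hw : max w (i + 1) = w := by omega
    rw [hw, List.map_map]
    apply List.map_congr_left
    intro j hj
    have hj' := List.mem_range.mp hj
    by_cases hji : j = i
    · subst hji; simp
    · have : ((j : Int) == (i : Int)) = false := by simp [hji]
      simp [hji, pvExt, hj']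
  · rw [if_neg (by simpa using hi)]
    have hiw : i = w := by omega
    subst hiw
    have hw : max i (i + 1) = i + 1 := by omega
    rw [hw, List.range_succ, List.map_append]
    congr 1
    · apply List.map_congr_left
      intro j hj
      have hj' := List.mem_range.mp hj
      simp [show j ≠ i by omega, pvExt, hj']
    · simp

theorem pvColStep_rng (w i : Nat) (h : i ≤ w) (f : Nat → Int × Int) (c : Char) :
    pvColStep (pvRng w f) ((i : Int), c)
      = pvRng (max w (i + 1)) (fun j => if j = i then pvBump (pvExt w f i) c else pvExt w f j) := by
  show (pvRng w f).insert (i : Int) _ = _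
  rw [pvRng_getD, pvRng_insert w i h]
  rfl

theorem pv_inner (cs : List Char) : ∀ (w i : Nat) (f : Nat → Int × Int), i ≤ w →
    (PySem.List.enumerate cs (i : Int)).foldl pvColStep (pvRng w f)
      = pvRng (max w (i + cs.length))
          (fun j => if i ≤ j ∧ j < i + cs.length
            then pvBump (pvExt w f j) (cs.getD (j - i) ' ') else pvExt w f j) := by
  induction cs with
  | nil =>
      intro w i f h
      rw [PySem.List.enumerate_nil, List.foldl_nil]
      simp only [List.length_nil]
      have hw : max w (i + 0) = w := by omega
      rw [hw]
      apply pvRng_congr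
      intro j hj
      rw [if_neg (by omega)]
      simp [pvExt, hj]
  | cons c cs ih =>
      intro w i f h
      rw [PySem.List.enumerate_cons, List.foldl_cons, pvColStep_rng w i h,
        show (i : Int) + 1 = ((i + 1 : Nat) : Int) by push_cast; ring,
        ih (max w (i + 1)) (i + 1) _ (by omega)]
      have hw : max (max w (i + 1)) (i + 1 + cs.length) = max w (i + (c :: cs).length) := by
        simp only [List.length_cons]; omega
      rw [hw]
      apply pvRng_congr
      intro j hj
      by_cases hji : j = i
      · subst hji
        rw [if_neg (by omega), if_pos ⟨le_refl _, by simp only [List.length_cons]; omega⟩]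
        simp [pvExt, show j < max w (j + 1) by omega]
      · have he : pvExt (max w (i + 1)) (fun j => if j = i then pvBump (pvExt w f i) c else pvExt w f j) j
            = pvExt w f j := by
          by_cases hjw : j < max w (i + 1)
          · simp [pvExt, hjw, hji]
          · simp [pvExt, hjw, show ¬ j < w by omega]
        by_cases hr : i + 1 ≤ j ∧ j < i + 1 + cs.length
        · rw [if_pos hr, if_pos (by simp only [List.length_cons]; omega), he]
          congr 1
          have : j - i = (j - (i + 1)) + 1 := by omega
          rw [this]
          simp
        · rw [if_neg hr, if_neg (by simp only [List.length_cons]; omega), he]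

theorem pv_outer (lines : List String) : ∀ (w : Nat) (f : Nat → Int × Int),
    lines.foldl (fun d line => (PySem.List.enumerate line.toList 0).foldl pvColStep d) (pvRng w f)
      = pvRng (lines.foldl (fun m l => max m l.toList.length) w)
          (fun j => lines.foldl
            (fun zo l => if j < l.toList.length then pvBump zo (l.toList.getD j ' ') else zo)
            (pvExt w f j)) := by
  induction lines with
  | nil =>
      intro w f
      rw [List.foldl_nil, List.foldl_nil]
      apply pvRng_congr
      intro j hj
      simp [pvExt, hj]
  | cons l ls ih =>
      intro w f
      rw [List.foldl_cons]
      have hin := pv_inner l.toList w 0 f (by omega)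
      rw [show ((0 : Nat) : Int) = (0 : Int) from rfl] at hin
      rw [hin, ih]
      simp only [Nat.zero_add, Nat.zero_le, true_and, Nat.sub_zero]
      rw [List.foldl_cons]
      congr 1
      funext j
      rw [List.foldl_cons]
      congr 1
      simp only [pvExt]
      by_cases hjw : j < max w l.toList.length
      · rw [if_pos hjw]
      · rw [if_neg hjw, if_neg (show ¬ j < l.toList.length by omega),
          if_neg (show ¬ j < w by omega)]

theorem pv_count (lines : List String) (j : Nat) : ∀ (nz no : Nat),
    lines.foldl
        (fun zo l => if j < l.toList.length then pvBump zo (l.toList.getD j ' ') else zo)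
        ((nz : Int), (no : Int))
      = (((lines.foldl
            (fun (zo : Nat × Nat) l =>
              if j < l.toList.length then
                let bit := pvIntChar (l.toList.getD j ' ')
                if bit = 0 then (zo.1 + 1, zo.2) else if bit = 1 then (zo.1, zo.2 + 1) else zo
              else zo) (nz, no)).1 : Int),
         ((lines.foldl
            (fun (zo : Nat × Nat) l =>
              if j < l.toList.length then
                let bit := pvIntChar (l.toList.getD j ' ')
                if bit = 0 then (zo.1 + 1, zo.2) else if bit = 1 then (zo.1, zo.2 + 1) else zo
              else zo) (nz, no)).2 : Int)) := by
  induction lines with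
  | nil => intro nz no; rfl
  | cons l ls ih =>
      intro nz no
      simp only [List.foldl_cons]
      by_cases hj : j < l.toList.length
      · simp only [if_pos hj]
        by_cases h0 : pvIntChar (l.toList.getD j ' ') = 0
        · have h1 : ¬ pvIntChar (l.toList.getD j ' ') = 1 := by rw [h0]; decide
          have hb : pvBump ((nz : Int), (no : Int)) (l.toList.getD j ' ')
              = (((nz + 1 : Nat) : Int), (no : Int)) := by
            simp only [pvBump]
            rw [if_pos h0, if_neg h1]
            simp
          rw [hb]
          simp only [h0, reduceIte]
          exact ih (nz + 1) no
        · by_cases h1 : pvIntChar (l.toList.getD j ' ') = 1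
          · have hb : pvBump ((nz : Int), (no : Int)) (l.toList.getD j ' ')
                = ((nz : Int), ((no + 1 : Nat) : Int)) := by
              simp only [pvBump]
              rw [if_neg h0, if_pos h1]
              simp
            rw [hb]
            simp only [h1, reduceIte]
            exact ih nz (no + 1)
          · have hb : pvBump ((nz : Int), (no : Int)) (l.toList.getD j ' ')
                = ((nz : Int), (no : Int)) := by
              simp only [pvBump]
              rw [if_neg h0, if_neg h1]
              simp
            rw [hb]
            simp only [h0, h1, reduceIte]
            exact ih nz no
      · simp only [if_neg hj]
        exact ih nz no

theorem pvRng_values (w : Nat) (f : Nat → Int × Int) :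
    (pvRng w f).values = (List.range w).map f := by
  show ((List.range w).map (fun (j : Nat) => ((j : Int), f j))).map Prod.snd = _
  rw [List.map_map]
  rfl

theorem pv_final (l : List Nat) (F : Nat → Int × Int) (Z O : Nat → Nat)
    (h : ∀ j ∈ l, F j = ((Z j : Int), (O j : Int))) (ge : List Char × List Char) :
    (l.map F).foldl
        (fun (ge : List Char × List Char) zo =>
          if zo.1 > zo.2 then (ge.1 ++ ['0'], ge.2 ++ ['1']) else (ge.1 ++ ['1'], ge.2 ++ ['0'])) ge
      = l.foldl
          (fun (ge : List Char × List Char) j =>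
            if Z j > O j then (ge.1 ++ ['0'], ge.2 ++ ['1']) else (ge.1 ++ ['1'], ge.2 ++ ['0'])) ge := by
  induction l generalizing ge with
  | nil => rfl
  | cons j l ih =>
      rw [List.map_cons, List.foldl_cons, List.foldl_cons, h j List.mem_cons_self]
      have hcmp : (((Z j : Nat) : Int), ((O j : Nat) : Int)).1 > (((Z j : Nat) : Int), ((O j : Nat) : Int)).2 ↔ Z j > O j := by
        simp
      by_cases hzo : Z j > O j
      · rw [if_pos (hcmp.mpr hzo), if_pos hzo]
        exact ih (fun k hk => h k (List.mem_cons_of_mem _ hk)) _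
      · rw [if_neg (fun hx => hzo (hcmp.mp hx)), if_neg hzo]
        exact ih (fun k hk => h k (List.mem_cons_of_mem _ hk)) _

-- ===== VERDICT (by name: the statement is the Claim_ definition above) =====
theorem get_bitstrings_spec : Claim_equal_get_bitstrings := by
  intro lines _ hpre
  show get_bitstrings lines = get_bitstrings_alt lines
  rw [get_bitstrings, get_bitstrings_alt]
  have hsh := pvStrings_shape lines (PySem.Dict.empty, [], []) rfl
  have hnd := pvOuter_nodup lines (PySem.Dict.empty, [], []) (by simp)
  have hrel := pvOuter_rel lines PySem.Dict.empty ([], []) hpre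
  rw [hsh, pvRender_rel _ hnd, hrel]
  have hemp : pvMap PySem.Dict.empty = pvRng 0 (fun _ => (0, 0)) := rfl
  rw [hemp, pv_outer lines 0 (fun _ => (0, 0)), pvRng_values]
  rw [pv_final _ _
    (fun j => (lines.foldl
      (fun (zo : Nat × Nat) l =>
        if j < l.toList.length then
          let bit := pvIntChar (l.toList.getD j ' ')
          if bit = 0 then (zo.1 + 1, zo.2) else if bit = 1 then (zo.1, zo.2 + 1) else zo
        else zo) (0, 0)).1)
    (fun j => (lines.foldl
      (fun (zo : Nat × Nat) l =>
        if j < l.toList.length then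
          let bit := pvIntChar (l.toList.getD j ' ')
          if bit = 0 then (zo.1 + 1, zo.2) else if bit = 1 then (zo.1, zo.2 + 1) else zo
        else zo) (0, 0)).2)
    (by
      intro j _
      have hext : pvExt 0 (fun _ => ((0 : Int), (0 : Int))) j = ((0 : Int), (0 : Int)) := by
        simp [pvExt]
      rw [hext]
      exact pv_count lines j 0 0)]
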